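-- pv_equiv track=rewrite | github.com/selimoksuz/risk-model-pipeline | fix_all_flake8.py | fix_blank_lines
-- ===== SOURCE A (Python) =====
-- def fix_blank_lines(content):
--     """Fix E302, E305, E306 blank line errors"""
--     lines = content.split('\n')
--     fixed_lines = []
--     i = 0
--
--     while i < len(lines):
--         line = lines[i]
--
--         # Check for function/class definitions
--         if i > 0 and (line.strip().startswith('def ') or line.strip().startswith('class ')):
--             # Count blank lines before
--             blank_count = 0
--             j = i - 1
--             while j >= 0 and not lines[j].strip():
--                 blank_count += 1
--                 j -= 1
--
--             # Check if inside a class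
--             indent = len(line) - len(line.lstrip())
--             is_nested = indent > 0
--
--             # Remove existing blank lines
--             while fixed_lines and not fixed_lines[-1].strip():
--                 fixed_lines.pop()
--
--             # Add correct number of blank lines
--             if is_nested:
--                 fixed_lines.append('')  # 1 blank line for nested
--             else:
--                 fixed_lines.append('')  # 2 blank lines for top-level
--                 fixed_lines.append('')
--
--         fixed_lines.append(line)
--         i += 1
--
--     # Remove trailing blank lines
--     while fixed_lines and not fixed_lines[-1].strip():
--         fixed_lines.pop()
--
--     return '\n'.join(fixed_lines)
-- ===== SOURCE B (Python) =====
-- def fix_blank_lines(content):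
--     """Fix E302, E305, E306 blank line errors"""
--     out = []
--     pending = []  # blank lines not yet committed to the output
--     for i, line in enumerate(content.split('\n')):
--         stripped = line.strip()
--         if not stripped:
--             pending.append(line)  # defer: dropped before defs and at EOF
--             continue
--         if i > 0 and stripped.startswith(('def ', 'class ')):
--             out.append('')  # 1 blank line for nested
--             if len(line) == len(line.lstrip()):
--                 out.append('')  # 2 blank lines for top-level
--         else:
--             out.extend(pending)
--         out.append(line)
--         pending = []
--     return '\n'.join(out)
-- ===== Notes on version B (the rewrite author's own statement) =====
-- stated objective: simpler
-- what changed: B buffers pending blank lines and either flushes or discards them when the next non-blank line arrives in one forward pass, instead of A's append-then-pop backtracking on the output list plus a dead backward blank-count scan.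
import Mathlib
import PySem

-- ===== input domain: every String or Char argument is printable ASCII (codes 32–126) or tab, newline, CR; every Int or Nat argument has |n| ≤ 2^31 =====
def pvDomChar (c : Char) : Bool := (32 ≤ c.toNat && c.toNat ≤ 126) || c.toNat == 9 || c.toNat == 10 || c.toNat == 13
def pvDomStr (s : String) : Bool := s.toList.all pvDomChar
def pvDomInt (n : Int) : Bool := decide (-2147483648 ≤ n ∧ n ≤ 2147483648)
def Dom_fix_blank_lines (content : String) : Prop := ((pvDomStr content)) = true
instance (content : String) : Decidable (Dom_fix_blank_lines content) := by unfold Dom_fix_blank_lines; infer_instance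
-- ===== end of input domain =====

-- B replaces A's append-then-pop backtracking (and the dead backward blank-count scan)
-- by a single forward pass that buffers pending blank lines; same return value, simpler.

-- ===== PORT A =====
-- shared predicates, exactly the Python expressions `not line.strip()` and
-- `line.strip().startswith('def ') / ('class ')` (both Pythons use these literally)
def pvBlank (s : String) : Bool := PySem.Str.strip s == ""
def pvIsDef (s : String) : Bool :=
  PySem.Str.startswith (PySem.Str.strip s) "def " || PySem.Str.startswith (PySem.Str.strip s) "class "

-- A's `while fixed_lines and not fixed_lines[-1].strip(): fixed_lines.pop()`
def pvRstrip (l : List String) : List String := (l.reverse.dropWhile pvBlank).reverse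

-- A's dead back-scan: `j = i - 1; while j >= 0 and not lines[j].strip(): blank_count += 1; j -= 1`
def pvCountBack (lines : List String) (j : Int) (acc : Nat) : Nat :=
  if h : 0 ≤ j then
    if (PySem.List.pyGet? lines j).any pvBlank then pvCountBack lines (j - 1) (acc + 1) else acc
  else acc
termination_by (j + 1).toNat
decreasing_by omega

-- A's `while i < len(lines)` loop over index i and accumulator fixed_lines
def pvALoop (lines : List String) : List String → Nat → List String → List String
  | [], _, acc => acc
  | line :: rest, i, acc =>
    if 0 < i ∧ pvIsDef line = true then
      let _blank_count := pvCountBack lines ((i : Int) - 1) 0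
      let indent : Int := (PySem.Str.len line : Int) - (PySem.Str.len (PySem.Str.lstrip line) : Int)
      let acc1 := pvRstrip acc
      let acc2 := if 0 < indent then acc1 ++ [""] else acc1 ++ ["", ""]
      pvALoop lines rest (i + 1) (acc2 ++ [line])
    else
      pvALoop lines rest (i + 1) (acc ++ [line])

-- content.split('\n'): sep is the non-empty literal "\n", so split? is always `some`
def pvLines (content : String) : List String := (PySem.Str.split? content "\n").getD []

def fix_blank_lines (content : String) : String :=
  let lines := pvLines content
  PySem.Str.join "\n" (pvRstrip (pvALoop lines lines 0 []))

-- ===== PORT B =====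
-- one forward pass: blanks are deferred in `pending`, discarded before a def/class
-- line (normalized blanks emitted instead) and at end of input, flushed otherwise
def pvBLoop : List String → Nat → List String → List String → List String
  | [], _, out, _pending => out
  | line :: rest, i, out, pending =>
    if pvBlank line = true then
      pvBLoop rest (i + 1) out (pending ++ [line])
    else if 0 < i ∧ pvIsDef line = true then
      let out1 := out ++ [""]
      let out2 := if PySem.Str.len line = PySem.Str.len (PySem.Str.lstrip line) then out1 ++ [""] else out1
      pvBLoop rest (i + 1) (out2 ++ [line]) []
    else
      pvBLoop rest (i + 1) (out ++ pending ++ [line]) []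

def fix_blank_lines_alt (content : String) : String :=
  PySem.Str.join "\n" (pvBLoop (pvLines content) 0 [] [])

-- ===== PRECONDITION & SPEC =====
def Spec_fix_blank_lines (content : String) (out : String) : Prop := out = fix_blank_lines_alt content
instance (content : String) (out : String) : Decidable (Spec_fix_blank_lines content out) := by unfold Spec_fix_blank_lines; infer_instance

-- ===== CLAIM (what is proved, stated in full; the proofs are below) =====
def Claim_equal_fix_blank_lines : Prop := ∀ (content : String), Dom_fix_blank_lines content → Spec_fix_blank_lines content (fix_blank_lines content)

-- ===== LEMMAS AND PROOFS =====

-- a blank line is never a def/class line (its strip is empty)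
theorem pvBlank_not_isDef (s : String) (h : pvBlank s = true) : pvIsDef s = false := by
  unfold pvBlank at h
  unfold pvIsDef
  rw [beq_iff_eq] at h
  rw [h]
  decide

theorem pvLen_lstrip_le (s : String) :
    PySem.Str.len (PySem.Str.lstrip s) ≤ PySem.Str.len s := by
  simp only [PySem.Str.len_eq, PySem.Str.toList_lstrip]
  unfold PySem.Chars.lstrip
  exact_mod_cast List.length_dropWhile_le PySem.Chars.isspace s.toList

-- popping trailing blanks from out ++ pending gives back out, when pending is all
-- blank and out is empty or ends in a non-blank line
theorem pvRstrip_append (out pending : List String)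
    (hp : ∀ p ∈ pending, pvBlank p = true)
    (ho : out = [] ∨ ∃ o x, out = o ++ [x] ∧ pvBlank x = false) :
    pvRstrip (out ++ pending) = out := by
  unfold pvRstrip
  rw [List.reverse_append, List.dropWhile_append]
  have hpe : (pending.reverse.dropWhile pvBlank).isEmpty = true := by
    rw [List.isEmpty_iff, List.dropWhile_eq_nil_iff]
    intro x hx
    exact hp x (List.mem_reverse.mp hx)
  rw [if_pos hpe]
  rcases ho with rfl | ⟨o, x, rfl, hx⟩
  · simp
  · simp [hx]

-- the loop invariant: A's accumulator is out ++ pending, with pending all blank and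
-- out empty or ending in a non-blank line; then A (after final pop) agrees with B
theorem pvLoop_agree (lines : List String) :
    ∀ (rest : List String) (i : Nat) (out pending : List String),
    (∀ p ∈ pending, pvBlank p = true) →
    (out = [] ∨ ∃ o x, out = o ++ [x] ∧ pvBlank x = false) →
    pvRstrip (pvALoop lines rest i (out ++ pending)) = pvBLoop rest i out pending := by
  intro rest
  induction rest with
  | nil =>
    intro i out pending hp ho
    simp only [pvALoop, pvBLoop]
    exact pvRstrip_append out pending hp ho
  | cons line rest ih =>
    intro i out pending hp ho
    by_cases hb : pvBlank line = true
    · -- blank line: A takes the else branch (a blank line is never a def), B defers it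
      have hd : pvIsDef line = false := pvBlank_not_isDef line hb
      simp only [pvALoop, pvBLoop, hd, hb, if_pos, Bool.false_eq_true, and_false, if_false]
      rw [List.append_assoc]
      apply ih (i + 1) out (pending ++ [line])
      · intro p hpm
        rcases List.mem_append.mp hpm with h | h
        · exact hp p h
        · rw [List.mem_singleton.mp h]; exact hb
      · exact ho
    · simp only [pvALoop, pvBLoop, hb]
      by_cases hc : 0 < i ∧ pvIsDef line = true
      · -- def/class line: A pops the blanks and inserts, B discards pending and inserts
        simp only [hc]
        rw [pvRstrip_append out pending hp ho]
        have hle := pvLen_lstrip_le line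
        have hout2 :
            (if (0 : Int) < (PySem.Str.len line : Int) - (PySem.Str.len (PySem.Str.lstrip line) : Int)
              then out ++ [""] else out ++ ["", ""])
            = (if PySem.Str.len line = PySem.Str.len (PySem.Str.lstrip line)
              then (out ++ [""]) ++ [""] else out ++ [""]) := by
          by_cases he : PySem.Str.len line = PySem.Str.len (PySem.Str.lstrip line)
          · rw [if_pos he, if_neg (by omega)]
            simp
          · rw [if_pos (by omega), if_neg he]
        rw [hout2]
        have := ih (i + 1)
          ((if PySem.Str.len line = PySem.Str.len (PySem.Str.lstrip line)
            then (out ++ [""]) ++ [""] else out ++ [""]) ++ [line]) []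
          (by intro p hpm; simp at hpm)
          (Or.inr ⟨_, line, rfl, Bool.not_eq_true _ ▸ eq_false_of_ne_true hb⟩)
        simpa using this
      · -- ordinary line: A appends, B flushes pending and appends
        simp only [hc, if_false]
        have := ih (i + 1) (out ++ pending ++ [line]) []
          (by intro p hpm; simp at hpm)
          (Or.inr ⟨out ++ pending, line, by simp, eq_false_of_ne_true hb⟩)
        simpa using this

-- ===== VERDICT (by name: the statement is the Claim_ definition above) =====
theorem fix_blank_lines_spec : Claim_equal_fix_blank_lines := by
  intro content _
  unfold Spec_fix_blank_lines fix_blank_lines fix_blank_lines_alt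
  exact congrArg (PySem.Str.join "\n")
    (pvLoop_agree (pvLines content) (pvLines content) 0 [] [] (by intro p hp; simp at hp) (Or.inl rfl))
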